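-- pv_equiv track=rewrite | github.com/stratosphereips/bsy-clippy | bsy-clippy.py | strip_think_segments
-- ===== SOURCE A (Python) =====
-- def strip_think_segments(text):
--     """Return text with <think> sections removed."""
--     if not text:
--         return ""
--
--     result = []
--     idx = 0
--     in_think = False
--
--     while idx < len(text):
--         if in_think:
--             close_idx = text.find("</think>", idx)
--             if close_idx == -1:
--                 break
--             idx = close_idx + len("</think>")
--             in_think = False
--         else:
--             open_idx = text.find("<think>", idx)
--             if open_idx == -1:
--                 result.append(text[idx:])
--                 break
--
--             if open_idx > idx:
--                 result.append(text[idx:open_idx])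
--             idx = open_idx + len("<think>")
--             in_think = True
--
--     return "".join(result).strip()
-- ===== SOURCE B (Python) =====
-- def strip_think_segments(text):
--     """Return text with <think> sections removed."""
--     if not text:
--         return ""
--     first, *rest = text.split("<think>")
--     pieces = [first]
--     for part in rest:
--         _, sep, tail = part.partition("</think>")
--         if sep:
--             pieces.append(tail)
--     return "".join(pieces).strip()
-- ===== Notes on version B (the rewrite author's own statement) =====
-- stated objective: idiomatic
-- what changed: Replaces the manual two-state find-loop (index jumping, in_think flag, slice bookkeeping) by one str.split on the opening tag followed by a partition on the closing tag for each later piece, keeping only the tails after a closing tag.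
import Mathlib
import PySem

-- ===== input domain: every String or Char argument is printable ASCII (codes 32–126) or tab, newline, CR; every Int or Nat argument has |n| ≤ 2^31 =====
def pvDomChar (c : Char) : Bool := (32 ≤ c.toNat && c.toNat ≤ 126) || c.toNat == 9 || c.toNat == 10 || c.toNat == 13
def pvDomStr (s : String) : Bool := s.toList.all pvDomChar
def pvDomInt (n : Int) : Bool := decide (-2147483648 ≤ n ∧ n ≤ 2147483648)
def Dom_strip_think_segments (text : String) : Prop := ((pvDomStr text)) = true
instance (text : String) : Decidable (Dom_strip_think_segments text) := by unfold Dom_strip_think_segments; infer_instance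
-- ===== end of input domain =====

-- B replaces A's manual two-state find-loop by one split on the opening tag plus a partition on the closing tag per piece (idiomatic, same cost).

def pvO : List Char := "<think>".toList
def pvC : List Char := "</think>".toList

-- ===== PORT A =====
-- A's while-loop over the index `idx`; the index is represented by the remaining
-- suffix s = text[idx:], exact because text.find(sub, idx) = idx + find(text[idx:], sub).
def pvLoopA (s : List Char) (inThink : Bool) (acc : List (List Char)) : List (List Char) :=
  if inThink then
    let closeIdx := PySem.Chars.find s pvC
    if h : closeIdx = -1 then acc
    else pvLoopA (s.drop (closeIdx.toNat + 8)) false acc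
  else
    let openIdx := PySem.Chars.find s pvO
    if h : openIdx = -1 then acc ++ [s]
    else pvLoopA (s.drop (openIdx.toNat + 7)) true
      (if 0 < openIdx then acc ++ [s.take openIdx.toNat] else acc)
termination_by s.length
decreasing_by
  · have hinf : pvC <:+: s := (PySem.Chars.find_ne_neg_one_iff s pvC).mp h
    have hne : s ≠ [] := by
      rintro rfl
      simpa [pvC] using hinf.length_le
    have := List.length_pos_iff.mpr hne
    simp [List.length_drop]; omega
  · have hinf : pvO <:+: s := (PySem.Chars.find_ne_neg_one_iff s pvO).mp h
    have hne : s ≠ [] := by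
      rintro rfl
      simpa [pvO] using hinf.length_le
    have := List.length_pos_iff.mpr hne
    simp [List.length_drop]; omega

def strip_think_segments (text : String) : String :=
  if text.toList = [] then ""
  else String.ofList (PySem.Chars.strip (PySem.Chars.join [] (pvLoopA text.toList false [])))

-- ===== PORT B =====
-- part.partition("</think>") is ported by hand via find (exact: partition keeps the
-- part after the first separator occurrence; Source B only uses the tail when sep ≠ "").
def pvGatherB (rest : List (List Char)) (pieces : List (List Char)) : List (List Char) :=
  rest.foldl (fun acc part =>
    if PySem.Chars.find part pvC = -1 then acc
    else acc ++ [part.drop ((PySem.Chars.find part pvC).toNat + 8)]) pieces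

def strip_think_segments_alt (text : String) : String :=
  if text.toList = [] then ""
  else
    let parts := PySem.Chars.splitOn text.toList pvO
    String.ofList (PySem.Chars.strip (PySem.Chars.join [] (pvGatherB parts.tail [parts.headI])))

-- ===== PRECONDITION & SPEC =====
def Spec_strip_think_segments (text : String) (out : String) : Prop := out = strip_think_segments_alt text
instance (text : String) (out : String) : Decidable (Spec_strip_think_segments text out) := by unfold Spec_strip_think_segments; infer_instance

-- ===== CLAIM (what is proved, stated in full; the proofs are below) =====
def Claim_equal_strip_think_segments : Prop := ∀ (text : String), Dom_strip_think_segments text → Spec_strip_think_segments text (strip_think_segments text)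

-- ===== LEMMAS AND PROOFS =====

mutual

def pvK : List Char → List Char
  | [] => []
  | c :: s => if pvO.isPrefixOf (c :: s) then pvD ((c :: s).drop 7) else c :: pvK s
termination_by s => s.length
decreasing_by all_goals (simp only [List.length_drop, List.length_cons]; omega)

def pvD : List Char → List Char
  | [] => []
  | c :: s => if pvC.isPrefixOf (c :: s) then pvK ((c :: s).drop 8) else pvD s
termination_by s => s.length
decreasing_by all_goals (simp only [List.length_drop, List.length_cons]; omega)
end

lemma pv_find_go (sub l : List Char) (k : Nat) :
    PySem.Chars.find.go sub l k =
      if PySem.Chars.find l sub = -1 then -1 else k + PySem.Chars.find l sub := by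
  induction l generalizing k with
  | nil => by_cases h : sub.isEmpty <;> simp [PySem.Chars.find.go, PySem.Chars.find, h]
  | cons c t ih =>
    by_cases h : sub.isPrefixOf (c :: t)
    · simp [PySem.Chars.find.go, PySem.Chars.find, h]
    · have hnn : -1 ≤ PySem.Chars.find t sub := PySem.Chars.neg_one_le_find t sub
      simp only [PySem.Chars.find.go, PySem.Chars.find, h]
      rw [ih, ih]
      split_ifs <;> omega

lemma pv_find_cons (sub : List Char) (c : Char) (t : List Char) :
    PySem.Chars.find (c :: t) sub =
      if sub.isPrefixOf (c :: t) then 0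
      else if PySem.Chars.find t sub = -1 then -1 else 1 + PySem.Chars.find t sub := by
  by_cases h : sub.isPrefixOf (c :: t)
  · simp [PySem.Chars.find, PySem.Chars.find.go, h]
  · simp only [PySem.Chars.find, PySem.Chars.find.go, h]
    rw [pv_find_go]
    simp [PySem.Chars.find]

lemma pvK_of_find_none {s : List Char} (h : PySem.Chars.find s pvO = -1) : pvK s = s := by
  induction s with
  | nil => simp [pvK]
  | cons c t ih =>
    rw [pv_find_cons] at h
    by_cases hp : pvO.isPrefixOf (c :: t)
    · simp [hp] at h
    · have hnn : -1 ≤ PySem.Chars.find t pvO := PySem.Chars.neg_one_le_find t pvO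
      simp only [hp, if_false] at h
      have ht : PySem.Chars.find t pvO = -1 := by by_cases h2 : PySem.Chars.find t pvO = -1 <;> simp [h2] at h <;> omega
      simp [pvK, hp, ih ht]

lemma pvK_of_find {s : List Char} (h : PySem.Chars.find s pvO ≠ -1) :
    pvK s = s.take (PySem.Chars.find s pvO).toNat
      ++ pvD (s.drop ((PySem.Chars.find s pvO).toNat + 7)) := by
  induction s with
  | nil => simp [PySem.Chars.find, PySem.Chars.find.go, pvO] at h
  | cons c t ih =>
    by_cases hp : pvO.isPrefixOf (c :: t)
    · have hf : PySem.Chars.find (c :: t) pvO = 0 := by rw [pv_find_cons]; simp [hp]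
      simp [pvK, hp, hf]
    · have hnn : -1 ≤ PySem.Chars.find t pvO := PySem.Chars.neg_one_le_find t pvO
      have hft : PySem.Chars.find t pvO ≠ -1 := by
        intro h2; rw [pv_find_cons] at h; simp [hp, h2] at h
      have hf : PySem.Chars.find (c :: t) pvO = 1 + PySem.Chars.find t pvO := by
        rw [pv_find_cons]; simp [hp, hft]
      have ht : (1 + PySem.Chars.find t pvO).toNat = (PySem.Chars.find t pvO).toNat + 1 := by omega
      rw [hf, ht]
      have hd : (PySem.Chars.find t pvO).toNat + 1 + 7 = ((PySem.Chars.find t pvO).toNat + 7) + 1 := by omega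
      rw [hd]
      simp [pvK, hp, List.take_succ_cons, List.drop_succ_cons, ih hft]

def pvSP : List Char → List (List Char)
  | [] => [[]]
  | c :: s =>
    if pvO.isPrefixOf (c :: s) then [] :: pvSP ((c :: s).drop 7)
    else (c :: (pvSP s).headI) :: (pvSP s).tail
termination_by s => s.length
decreasing_by all_goals (simp only [List.length_drop, List.length_cons]; omega)

lemma pvSP_ne_nil (s : List Char) : pvSP s ≠ [] := by
  cases s with
  | nil => simp [pvSP]
  | cons c t => rw [pvSP]; split <;> simp

lemma pv_splitOn_go (fuel : Nat) (l cur : List Char) (acc : List (List Char))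
    (hf : l.length < fuel) :
    PySem.Chars.splitOn.go pvO fuel l cur acc
      = acc.reverse ++ (pvSP l).modifyHead (cur.reverse ++ ·) := by
  induction fuel generalizing l cur acc with
  | zero => omega
  | succ fuel ih =>
    cases l with
    | nil => simp [PySem.Chars.splitOn.go, pvSP]
    | cons c rest =>
      have h7 : pvO.length = 7 := by decide
      by_cases hp : pvO.isPrefixOf (c :: rest)
      · have hlen : (rest.drop 6).length < fuel := by
          simp only [List.length_drop, List.length_cons] at hf ⊢; omega
        rw [PySem.Chars.splitOn.go]
        simp only [hp, if_true, h7, List.drop_succ_cons]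
        rw [ih _ _ _ hlen]
        rw [pvSP]
        simp only [hp, if_true, List.drop_succ_cons]
        rcases h : pvSP (rest.drop 6) with _ | ⟨a, as⟩
        · exact absurd h (pvSP_ne_nil _)
        · simp [h]
      · have hlen : rest.length < fuel := by
          simp only [List.length_cons] at hf; omega
        rw [PySem.Chars.splitOn.go]
        simp only [hp, Bool.false_eq_true, if_false]
        rw [ih _ _ _ hlen]
        rw [pvSP]
        simp only [hp, Bool.false_eq_true, if_false]
        rcases h : pvSP rest with _ | ⟨a, as⟩
        · exact absurd h (pvSP_ne_nil _)
        · simp [h]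

lemma pv_splitOn_eq (s : List Char) : PySem.Chars.splitOn s pvO = pvSP s := by
  rw [PySem.Chars.splitOn, pv_splitOn_go _ _ _ _ (by omega)]
  rcases h : pvSP s with _ | ⟨a, as⟩
  · exact absurd h (pvSP_ne_nil _)
  · simp

lemma pvD_of_find_none {s : List Char} (h : PySem.Chars.find s pvC = -1) : pvD s = [] := by
  induction s with
  | nil => simp [pvD]
  | cons c t ih =>
    rw [pv_find_cons] at h
    by_cases hp : pvC.isPrefixOf (c :: t)
    · simp [hp] at h
    · have hnn : -1 ≤ PySem.Chars.find t pvC := PySem.Chars.neg_one_le_find t pvC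
      simp only [hp, Bool.false_eq_true, if_false] at h
      have ht : PySem.Chars.find t pvC = -1 := by
        by_cases h2 : PySem.Chars.find t pvC = -1 <;> simp [h2] at h <;> omega
      simp [pvD, hp, ih ht]

lemma pvD_of_find {s : List Char} (h : PySem.Chars.find s pvC ≠ -1) :
    pvD s = pvK (s.drop ((PySem.Chars.find s pvC).toNat + 8)) := by
  induction s with
  | nil => simp [PySem.Chars.find, PySem.Chars.find.go, pvC] at h
  | cons c t ih =>
    by_cases hp : pvC.isPrefixOf (c :: t)
    · have hf : PySem.Chars.find (c :: t) pvC = 0 := by rw [pv_find_cons]; simp [hp]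
      simp [pvD, hp, hf]
    · have hnn : -1 ≤ PySem.Chars.find t pvC := PySem.Chars.neg_one_le_find t pvC
      have hft : PySem.Chars.find t pvC ≠ -1 := by
        intro h2; rw [pv_find_cons] at h; simp [hp, h2] at h
      have hf : PySem.Chars.find (c :: t) pvC = 1 + PySem.Chars.find t pvC := by
        rw [pv_find_cons]; simp [hp, hft]
      have ht : (1 + PySem.Chars.find t pvC).toNat = (PySem.Chars.find t pvC).toNat + 1 := by omega
      rw [hf, ht]
      have hd : (PySem.Chars.find t pvC).toNat + 1 + 8 = ((PySem.Chars.find t pvC).toNat + 8) + 1 := by omega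
      rw [hd]
      simp [pvD, hp, List.drop_succ_cons, ih hft]

lemma pvSP_of_find_none {s : List Char} (h : PySem.Chars.find s pvO = -1) : pvSP s = [s] := by
  induction s with
  | nil => simp [pvSP]
  | cons c t ih =>
    rw [pv_find_cons] at h
    by_cases hp : pvO.isPrefixOf (c :: t)
    · simp [hp] at h
    · have hnn : -1 ≤ PySem.Chars.find t pvO := PySem.Chars.neg_one_le_find t pvO
      simp only [hp, Bool.false_eq_true, if_false] at h
      have ht : PySem.Chars.find t pvO = -1 := by
        by_cases h2 : PySem.Chars.find t pvO = -1 <;> simp [h2] at h <;> omega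
      rw [pvSP]
      simp [hp, ih ht]

lemma pvSP_of_find {s : List Char} (h : PySem.Chars.find s pvO ≠ -1) :
    pvSP s = s.take (PySem.Chars.find s pvO).toNat
      :: pvSP (s.drop ((PySem.Chars.find s pvO).toNat + 7)) := by
  induction s with
  | nil => simp [PySem.Chars.find, PySem.Chars.find.go, pvO] at h
  | cons c t ih =>
    by_cases hp : pvO.isPrefixOf (c :: t)
    · have hf : PySem.Chars.find (c :: t) pvO = 0 := by rw [pv_find_cons]; simp [hp]
      rw [pvSP]
      simp [hp, hf]
    · have hnn : -1 ≤ PySem.Chars.find t pvO := PySem.Chars.neg_one_le_find t pvO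
      have hft : PySem.Chars.find t pvO ≠ -1 := by
        intro h2; rw [pv_find_cons] at h; simp [hp, h2] at h
      have hf : PySem.Chars.find (c :: t) pvO = 1 + PySem.Chars.find t pvO := by
        rw [pv_find_cons]; simp [hp, hft]
      have ht : (1 + PySem.Chars.find t pvO).toNat = (PySem.Chars.find t pvO).toNat + 1 := by omega
      rw [hf, ht]
      have hd : (PySem.Chars.find t pvO).toNat + 1 + 7 = ((PySem.Chars.find t pvO).toNat + 7) + 1 := by omega
      rw [hd]
      rw [pvSP]
      simp only [hp, Bool.false_eq_true, if_false]
      rw [ih hft]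
      simp [List.take_succ_cons, List.drop_succ_cons]

lemma pv_join_nil (ps : List (List Char)) : PySem.Chars.join [] ps = ps.flatten := by
  induction ps with
  | nil => simp [PySem.Chars.join_nil]
  | cons a as ih =>
    cases as with
    | nil => simp [PySem.Chars.join_singleton]
    | cons b bs => rw [PySem.Chars.join_cons_cons]; simp_all

def pvG (part : List Char) : Option (List Char) :=
  if PySem.Chars.find part pvC = -1 then none
  else some (part.drop ((PySem.Chars.find part pvC).toNat + 8))

lemma pvGatherB_eq (rest pieces : List (List Char)) :
    pvGatherB rest pieces = pieces ++ rest.filterMap pvG := by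
  induction rest generalizing pieces with
  | nil => simp [pvGatherB]
  | cons a as ih =>
    by_cases h : PySem.Chars.find a pvC = -1
    · simp only [pvGatherB, List.foldl_cons, h, if_true]
      rw [← pvGatherB]
      simp [ih, pvG, h]
    · simp only [pvGatherB, List.foldl_cons, h, if_false]
      rw [← pvGatherB]
      simp [ih, pvG, h]

lemma pv_infix_of_prefix_drop {sub s : List Char} {k : Nat} (h : sub <+: s.drop k) :
    sub <:+: s :=
  h.isInfix.trans (List.drop_suffix k s).isInfix

lemma pv_prefix_take_of_prefix_drop {sub t : List Char} {o j : Nat}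
    (hj : j + sub.length ≤ o) (h : sub <+: t.drop j) : sub <+: (t.take o).drop j := by
  obtain ⟨r, hr⟩ := h
  rw [List.drop_take, ← hr, List.take_append, List.take_of_length_le (by omega)]
  exact ⟨r.take (o - j - sub.length), rfl⟩

lemma pv_prefix_drop_of_prefix_take {sub t : List Char} {o j : Nat}
    (h : sub <+: (t.take o).drop j) : sub <+: t.drop j := by
  rw [List.drop_take] at h
  exact h.trans (List.take_prefix _ _)

lemma pv_no_close_before {t : List Char} {o : Nat}
    (hO : pvO <+: t.drop o) (hnc : ¬ pvC <:+: t.take o) :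
    ∀ j, j < o + 7 → ¬ pvC <+: t.drop j := by
  intro j hj hpre
  obtain ⟨r, hr⟩ := hpre
  obtain ⟨q, hq⟩ := hO
  by_cases hcase : j + 8 ≤ o
  · exact hnc (pv_infix_of_prefix_drop
      (pv_prefix_take_of_prefix_drop (by simp [pvC]; omega) ⟨r, hr⟩))
  · by_cases hcase2 : j < o
    · -- the "<think>" at o starts inside this "</think>" occurrence: impossible
      have hd1 : 1 ≤ o - j := by omega
      have hd2 : o - j ≤ 7 := by omega
      have e1 : pvO ++ q = pvC.drop (o - j) ++ r := by
        have : t.drop o = (t.drop j).drop (o - j) := by rw [List.drop_drop]; congr 1; omega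
        rw [← hq, ← hr, List.drop_append_of_le_length (by simp [pvC]; omega)] at this
        exact this
      set d := o - j with hdd
      interval_cases d <;> simp [pvO, pvC] at e1
    · -- the "</think>" starts inside the "<think>" at o: impossible
      have hd2 : j - o ≤ 6 := by omega
      have e1 : pvC ++ r = pvO.drop (j - o) ++ q := by
        have : t.drop j = (t.drop o).drop (j - o) := by rw [List.drop_drop]; congr 1; omega
        rw [← hr, ← hq, List.drop_append_of_le_length (by simp [pvO]; omega)] at this
        exact this
      set d := j - o with hdd
      interval_cases d <;> simp [pvO, pvC] at e1

lemma pv_find_eq_of_first {s sub : List Char} {k : Nat}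
    (h1 : sub <+: s.drop k) (h2 : ∀ j, j < k → ¬ sub <+: s.drop j) :
    PySem.Chars.find s sub = (k : Int) := by
  have hne : PySem.Chars.find s sub ≠ -1 :=
    (PySem.Chars.find_ne_neg_one_iff s sub).mpr (pv_infix_of_prefix_drop h1)
  have hnn : -1 ≤ PySem.Chars.find s sub := PySem.Chars.neg_one_le_find s sub
  have h0 : 0 ≤ PySem.Chars.find s sub := by omega
  obtain ⟨hp, hmin⟩ := PySem.Chars.find_spec h0
  rcases Nat.lt_trichotomy (PySem.Chars.find s sub).toNat k with hlt | heq | hgt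
  · exact absurd hp (h2 _ hlt)
  · omega
  · exact absurd h1 (hmin _ hgt)

lemma pv_find_drop {s sub : List Char} {k : Nat}
    (hk : (k : Int) ≤ PySem.Chars.find s sub) :
    PySem.Chars.find (s.drop k) sub = PySem.Chars.find s sub - k := by
  have h0 : 0 ≤ PySem.Chars.find s sub := le_trans (by omega) hk
  obtain ⟨hp, hmin⟩ := PySem.Chars.find_spec h0
  have hres : PySem.Chars.find (s.drop k) sub
      = (((PySem.Chars.find s sub).toNat - k : Nat) : Int) := by
    apply pv_find_eq_of_first
    · rw [List.drop_drop]
      have h : k + ((PySem.Chars.find s sub).toNat - k) = (PySem.Chars.find s sub).toNat := by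
        omega
      rw [h]
      exact hp
    · intro j hj hpre
      rw [List.drop_drop] at hpre
      exact hmin (k + j) (by omega) hpre
  rw [hres]; omega

lemma pv_find_of_infix_not {s : List Char} {sub : List Char} {x : List Char}
    (hx : x <:+: s) (h : PySem.Chars.find s sub = -1) : PySem.Chars.find x sub = -1 := by
  rw [PySem.Chars.find_eq_neg_one_iff] at h ⊢
  exact fun hc => h (hc.trans hx)

lemma pvD_eq_pieces_aux : ∀ (n : Nat) (t : List Char), t.length ≤ n →
    pvD t = ((pvSP t).filterMap pvG).flatten := by
  intro n
  induction n with
  | zero =>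
    intro t ht
    have : t = [] := List.eq_nil_of_length_eq_zero (by omega)
    subst this
    simp [pvD, pvSP, pvG, PySem.Chars.find, PySem.Chars.find.go, pvC]
  | succ n ih =>
    intro t ht
    by_cases ho : PySem.Chars.find t pvO = -1
    · rw [pvSP_of_find_none ho]
      by_cases hc : PySem.Chars.find t pvC = -1
      · simp [pvD_of_find_none hc, pvG, hc]
      · rw [pvD_of_find hc]
        have hK : pvK (t.drop ((PySem.Chars.find t pvC).toNat + 8))
            = t.drop ((PySem.Chars.find t pvC).toNat + 8) := by
          apply pvK_of_find_none
          exact pv_find_of_infix_not (List.drop_suffix _ _).isInfix ho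
        simp [hK, pvG, hc]
    · -- an open tag at o
      have hnn : -1 ≤ PySem.Chars.find t pvO := PySem.Chars.neg_one_le_find t pvO
      have h0 : 0 ≤ PySem.Chars.find t pvO := by omega
      obtain ⟨hOpre, hOmin⟩ := PySem.Chars.find_spec h0
      set o := (PySem.Chars.find t pvO).toNat with hodef
      have holen : o + 7 ≤ t.length := by
        have := hOpre.length_le
        simp [pvO, List.length_drop] at this
        omega
      have htlen : (t.drop (o + 7)).length ≤ n := by
        simp [List.length_drop]; omega
      rw [pvSP_of_find ho]
      by_cases hc : PySem.Chars.find (t.take o) pvC = -1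
      · -- no close tag inside the kept piece: this piece is dropped entirely
        have hnc : ¬ pvC <:+: t.take o := (PySem.Chars.find_eq_neg_one_iff _ _).mp hc
        have hno : ∀ j, j < o + 7 → ¬ pvC <+: t.drop j := pv_no_close_before hOpre hnc
        have hGnone : pvG (t.take o) = none := by simp [pvG, hc]
        rw [List.filterMap_cons, hGnone]
        rw [← ih _ htlen]
        by_cases hm : PySem.Chars.find t pvC = -1
        · rw [pvD_of_find_none hm, pvD_of_find_none
            (pv_find_of_infix_not (List.drop_suffix _ _).isInfix hm)]
        · have hmn : -1 ≤ PySem.Chars.find t pvC := PySem.Chars.neg_one_le_find t pvC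
          have hm0 : 0 ≤ PySem.Chars.find t pvC := by omega
          obtain ⟨hCpre, hCmin⟩ := PySem.Chars.find_spec hm0
          have hge : o + 7 ≤ (PySem.Chars.find t pvC).toNat := by
            by_contra hlt
            exact hno _ (by omega) hCpre
          have hfd : PySem.Chars.find (t.drop (o + 7)) pvC
              = PySem.Chars.find t pvC - (o + 7) := pv_find_drop (by omega)
          have hfd' : PySem.Chars.find (t.drop (o + 7)) pvC ≠ -1 := by
            rw [hfd]; omega
          rw [pvD_of_find hm, pvD_of_find hfd']
          congr 1
          rw [hfd, List.drop_drop]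
          congr 1
          omega
      · -- close tag inside the kept piece at c'
        have hcn : -1 ≤ PySem.Chars.find (t.take o) pvC :=
          PySem.Chars.neg_one_le_find _ _
        have hc0 : 0 ≤ PySem.Chars.find (t.take o) pvC := by omega
        obtain ⟨hCpre, hCmin⟩ := PySem.Chars.find_spec hc0
        set c' := (PySem.Chars.find (t.take o) pvC).toNat with hcdef
        have hclen : c' + 8 ≤ o := by
          have h1 := hCpre.length_le
          simp [pvC, List.length_drop, List.length_take] at h1
          omega
        have hfindC : PySem.Chars.find t pvC = (c' : Int) := by
          apply pv_find_eq_of_first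
          · exact pv_prefix_drop_of_prefix_take hCpre
          · intro j hjc hpre
            exact hCmin j hjc (pv_prefix_take_of_prefix_drop (by simp [pvC]; omega) hpre)
        have hfindO : PySem.Chars.find (t.drop (c' + 8)) pvO = ((o - (c' + 8) : Nat) : Int) := by
          apply pv_find_eq_of_first
          · rw [List.drop_drop]
            have : c' + 8 + (o - (c' + 8)) = o := by omega
            rw [this]
            exact hOpre
          · intro j hjc hpre
            rw [List.drop_drop] at hpre
            exact hOmin _ (by omega) hpre
        have hfindO' : PySem.Chars.find (t.drop (c' + 8)) pvO ≠ -1 := by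
          rw [hfindO]; omega
        rw [pvD_of_find (by rw [hfindC]; omega), hfindC]
        simp only [Int.toNat_natCast]
        rw [pvK_of_find hfindO', hfindO]
        have hG : pvG (t.take o) = some ((t.take o).drop (c' + 8)) := by
          simp only [pvG, hcdef]
          rw [if_neg hc]
        rw [List.filterMap_cons, hG]
        simp only [Int.toNat_natCast, List.flatten_cons]
        rw [← ih _ htlen]
        congr 1
        · rw [List.drop_take]
        · congr 1
          rw [List.drop_drop]
          congr 1
          omega

lemma pvD_eq_pieces (t : List Char) :
    pvD t = ((pvSP t).filterMap pvG).flatten :=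
  pvD_eq_pieces_aux t.length t le_rfl

lemma pvK_eq_pieces (s : List Char) :
    pvK s = (pvSP s).headI ++ (((pvSP s).tail).filterMap pvG).flatten := by
  by_cases ho : PySem.Chars.find s pvO = -1
  · simp [pvK_of_find_none ho, pvSP_of_find_none ho]
  · rw [pvK_of_find ho, pvSP_of_find ho]
    simp [pvD_eq_pieces]

lemma pvLoopA_join (s : List Char) (b : Bool) (acc : List (List Char)) :
    PySem.Chars.join [] (pvLoopA s b acc) =
      PySem.Chars.join [] acc ++ (if b then pvD s else pvK s) := by
  fun_induction pvLoopA s b acc with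
  | case1 s acc _ h =>
    have h' : PySem.Chars.find s pvC = -1 := h
    simp [pvD_of_find_none h']
  | case2 s acc ci h ih =>
    have h' : PySem.Chars.find s pvC ≠ -1 := h
    simp only [show ci = PySem.Chars.find s pvC from rfl] at ih ⊢
    rw [ih]
    simp [pvD_of_find h']
  | case3 s bIn acc hb _ h =>
    have h' : PySem.Chars.find s pvO = -1 := h
    simp [hb, pvK_of_find_none h', pv_join_nil]
  | case4 s bIn acc hb oi h ih =>
    have h' : PySem.Chars.find s pvO ≠ -1 := h
    simp only [show oi = PySem.Chars.find s pvO from rfl] at ih ⊢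
    have hnn : -1 ≤ PySem.Chars.find s pvO := PySem.Chars.neg_one_le_find s pvO
    by_cases hpos : 0 < PySem.Chars.find s pvO
    · simp only [hpos, if_true, dite_eq_ite] at ih ⊢
      rw [ih]
      simp [hb, pvK_of_find h', pv_join_nil]
    · have h0 : PySem.Chars.find s pvO = 0 := by omega
      simp only [hpos, if_false, dite_eq_ite] at ih ⊢
      rw [ih]
      simp [hb, pvK_of_find h', h0, pv_join_nil]

-- ===== VERDICT (by name: the statement is the Claim_ definition above) =====
theorem strip_think_segments_spec : Claim_equal_strip_think_segments := by
  intro text _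
  unfold Spec_strip_think_segments strip_think_segments strip_think_segments_alt
  by_cases h : text.toList = []
  · simp [h]
  · simp only [h, if_false]
    congr 2
    rw [pvLoopA_join, pvGatherB_eq, pv_splitOn_eq]
    rw [pv_join_nil, pv_join_nil]
    simp [pvK_eq_pieces]
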